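-- pv_equiv track=rewrite | github.com/yhyeil/Algorithms_py | colorful/colorful.py | dfs
-- ===== SOURCE A (Python) =====
-- def dfs(graph, start, end, color, visited):
--     if start == end:
--         return True
--     visited.add(start)
--     for neighbor, edge_color in graph[start]:
--         if neighbor not in visited and edge_color == color:
--             if dfs(graph, neighbor, end, color, visited):
--                 return True
--     return False
-- ===== SOURCE B (Python) =====
-- def dfs(graph, start, end, color, visited):
--     if start == end:
--         return True
--     visited.add(start)
--     stack = [iter(graph[start])]
--     while stack:
--         advanced = False
--         for neighbor, edge_color in stack[-1]:
--             if neighbor not in visited and edge_color == color: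
--                 if neighbor == end:
--                     return True
--                 visited.add(neighbor)
--                 stack.append(iter(graph[neighbor]))
--                 advanced = True
--                 break
--         if not advanced:
--             stack.pop()
--     return False
-- ===== Notes on version B (the rewrite author's own statement) =====
-- stated objective: alternative
-- what changed: The recursive colored-edge DFS is replaced by an iterative loop over an explicit stack of adjacency-list iterators (same pre-order traversal, no recursion, so no RecursionError on deep graphs).
-- outside the precondition, e.g. on dfs({1: [], 3: [(4, 5)]}, 1, 7, 5, set()): A returns False, B returns False
import Mathlib
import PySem

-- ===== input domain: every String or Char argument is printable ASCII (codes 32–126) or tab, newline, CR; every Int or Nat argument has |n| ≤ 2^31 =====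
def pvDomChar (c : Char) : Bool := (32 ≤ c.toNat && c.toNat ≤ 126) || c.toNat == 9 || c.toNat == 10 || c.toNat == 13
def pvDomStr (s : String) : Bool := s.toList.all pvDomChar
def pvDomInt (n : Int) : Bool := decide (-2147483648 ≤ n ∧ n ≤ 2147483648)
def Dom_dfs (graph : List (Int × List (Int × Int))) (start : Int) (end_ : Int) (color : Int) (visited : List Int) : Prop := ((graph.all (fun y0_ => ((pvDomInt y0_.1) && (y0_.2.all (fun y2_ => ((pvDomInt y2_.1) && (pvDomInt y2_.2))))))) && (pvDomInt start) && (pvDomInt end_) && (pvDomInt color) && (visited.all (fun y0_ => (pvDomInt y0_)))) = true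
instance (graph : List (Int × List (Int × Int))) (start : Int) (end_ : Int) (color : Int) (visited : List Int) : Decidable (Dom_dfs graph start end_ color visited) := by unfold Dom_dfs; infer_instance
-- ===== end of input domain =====

-- B replaces the recursive colored-edge DFS by an iterative loop over an explicit stack of
-- adjacency iterators (same traversal, no recursion); equivalence is about the RETURN value
-- only — both Pythons mutate the `visited` set argument in the same way.
-- Fuel is an artifact for termination: it bounds the recursion depth (A) / stack height (B);
-- under Pre_ every nested call adds a fresh graph key to `visited`, so depth never exceeds
-- the number of keys and `graph.length` fuel at the first level never runs out.

-- ===== PORT A =====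
-- `visited` is threaded through the fold (Python mutates one shared set); the Bool accumulator
-- component models the `return True` early exit (once true, later elements are skipped).
def pvDfsA (g : List (Int × List (Int × Int))) (e col : Int) : Nat → Int → PySem.Set Int → Bool × PySem.Set Int
  | 0, _, V => (false, V)                    -- depth fuel exhausted: unreachable under Pre_
  | f + 1, s, V =>
    -- if start == end: return True
    if s = e then (true, V)
    else
      -- visited.add(start); for neighbor, edge_color in graph[start]: …
      match (PySem.Dict.mk g).get? s with    -- graph[start]; none = KeyError, excluded by Pre_
      | none => (false, PySem.Set.add V s)
      | some adj =>
        adj.foldl (fun acc p =>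
          if acc.1 then acc                  -- already returned True
          else if !(PySem.Set.contains acc.2 p.1) && (p.2 == col) then
            pvDfsA g e col f p.1 acc.2       -- if dfs(graph, neighbor, …): return True
          else acc) (false, PySem.Set.add V s)

def dfs (graph : List (Int × List (Int × Int))) (start : Int) (end_ : Int) (color : Int) (visited : List Int) : Bool :=
  (pvDfsA graph end_ color (graph.length + 1) start (PySem.Set.ofList visited)).1

-- ===== PORT B =====
-- B-side termination artifacts: each stack frame is (fuel, not-yet-consumed iterator suffix);
-- a pushed frame gets one unit less fuel, and the measure pvMeasB decreases at every step.
def pvAdjMax (g : List (Int × List (Int × Int))) : Nat :=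
  g.foldl (fun m p => max m p.2.length) 0

def pvW (g : List (Int × List (Int × Int))) : Nat := pvAdjMax g + 2

def pvMeasB (W : Nat) : List (Nat × List (Int × Int)) → Nat
  | [] => 0
  | (f, l) :: rest => (l.length + 1) * W ^ f + pvMeasB W rest

theorem pv_foldl_max_init (l : List (Int × List (Int × Int))) (a : Nat) :
    a ≤ l.foldl (fun m p => max m p.2.length) a := by
  induction l generalizing a with
  | nil => exact Nat.le_refl a
  | cons hd t IH => exact le_trans (Nat.le_max_left a hd.2.length) (IH _)

theorem pv_foldl_max_mem (l : List (Int × List (Int × Int))) (a : Nat) :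
    ∀ p ∈ l, p.2.length ≤ l.foldl (fun m p => max m p.2.length) a := by
  induction l generalizing a with
  | nil => intro p hp; cases hp
  | cons hd t IH =>
    intro p hp
    rcases List.mem_cons.mp hp with h | h
    · subst h
      exact le_trans (Nat.le_max_right a p.2.length) (pv_foldl_max_init t _)
    · exact IH _ p h

theorem pvGetD_len_lt (g : List (Int × List (Int × Int))) (n : Int) :
    (((PySem.Dict.mk g).get? n).getD []).length + 1 < pvW g := by
  cases h : (PySem.Dict.mk g).get? n with
  | none => simp [pvW]
  | some l =>
    have hmem : (n, l) ∈ (PySem.Dict.mk g).items := PySem.Dict.mem_items_of_get?_eq_some _ h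
    have hmem' : (n, l) ∈ g := hmem
    have hlen : l.length ≤ pvAdjMax g := pv_foldl_max_mem g 0 (n, l) hmem'
    simp only [Option.getD]
    simp [pvW]; omega

theorem pvMeasB_pop (W : Nat) (hW : 0 < W) (f : Nat) (rest : List (Nat × List (Int × Int))) :
    pvMeasB W rest < pvMeasB W ((f, []) :: rest) := by
  have := Nat.pow_pos hW (n := f)
  simp [pvMeasB]; omega

theorem pvMeasB_consume (W : Nat) (hW : 0 < W) (f : Nat) (hd : Int × Int)
    (t : List (Int × Int)) (rest : List (Nat × List (Int × Int))) :
    pvMeasB W ((f, t) :: rest) < pvMeasB W ((f, hd :: t) :: rest) := by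
  have h1 := Nat.pow_pos hW (n := f)
  simp only [pvMeasB, List.length_cons]
  have : (t.length + 1) * W ^ f < (t.length + 1 + 1) * W ^ f := by
    have := Nat.mul_lt_mul_of_lt_of_le (Nat.lt_succ_self (t.length + 1)) (Nat.le_refl (W ^ f)) h1
    exact this
  omega

theorem pvMeasB_push (W : Nat) (hW : 0 < W) (adj' : List (Int × Int))
    (h : adj'.length + 1 < W) (f : Nat) (hd : Int × Int) (t : List (Int × Int))
    (rest : List (Nat × List (Int × Int))) :
    pvMeasB W ((f, adj') :: (f + 1, t) :: rest) < pvMeasB W ((f + 1, hd :: t) :: rest) := by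
  simp only [pvMeasB, List.length_cons]
  have h1 : (adj'.length + 1) * W ^ f < W ^ (f + 1) := by
    rw [pow_succ, mul_comm (W ^ f) W]
    exact Nat.mul_lt_mul_of_lt_of_le h (Nat.le_refl (W ^ f)) (Nat.pow_pos hW (n := f))
  have h2 : (t.length + 1 + 1) * W ^ (f + 1) = W ^ (f + 1) + (t.length + 1) * W ^ (f + 1) := by
    ring
  omega

theorem pvW_pos (g : List (Int × List (Int × Int))) : 0 < pvW g := by
  unfold pvW; omega

-- the machine: scan the top iterator for the next admissible neighbor, return True if it is
-- `end`, otherwise mark it visited and push its adjacency iterator; pop exhausted iterators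
def pvRunB (g : List (Int × List (Int × Int))) (e col : Int) :
    List (Nat × List (Int × Int)) → PySem.Set Int → Bool
  | [], _ => false                                   -- while stack: exhausted → return False
  | (_, []) :: rest, V => pvRunB g e col rest V      -- top iterator exhausted: stack.pop()
  | (f, (n, c) :: t) :: rest, V =>
    if !(PySem.Set.contains V n) && (c == col) then
      match f with
      | 0 => pvRunB g e col ((0, t) :: rest) V       -- depth fuel exhausted: dead under Pre_
      | f' + 1 =>
        if n = e then true                           -- if neighbor == end: return True
        else                                         -- visited.add(neighbor); stack.append(iter(graph[neighbor]))
          -- getD [] : Python raises KeyError here; such inputs are outside Pre_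
          pvRunB g e col ((f', (((PySem.Dict.mk g).get? n).getD [])) :: (f' + 1, t) :: rest)
            (PySem.Set.add V n)
    else pvRunB g e col ((f, t) :: rest) V
termination_by stack _ => pvMeasB (pvW g) stack
decreasing_by
  · exact pvMeasB_pop (pvW g) (pvW_pos g) _ rest
  · exact pvMeasB_consume (pvW g) (pvW_pos g) 0 (n, c) t rest
  · exact pvMeasB_push (pvW g) (pvW_pos g) _ (pvGetD_len_lt g n) f' (n, c) t rest
  · exact pvMeasB_consume (pvW g) (pvW_pos g) f (n, c) t rest

def dfs_alt (graph : List (Int × List (Int × Int))) (start : Int) (end_ : Int) (color : Int) (visited : List Int) : Bool :=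
  if start = end_ then true
  else
    let V := PySem.Set.add (PySem.Set.ofList visited) start
    match (PySem.Dict.mk graph).get? start with  -- iter(graph[start]); none = KeyError, outside Pre_
    | none => false
    | some adj => pvRunB graph end_ color [(graph.length, adj)] V

-- ===== PRECONDITION & SPEC =====
-- Pre_ excludes exactly the KeyError risk: unless start == end, `start` must be a key, and every
-- color-matching edge target anywhere in the graph must be end, initially visited, or a key.
-- This is slightly narrower than "A returns" (a color-matching non-key target that the search
-- never reaches does not make A raise); such inputs are excluded for being uncheckable in closed form.
def Pre_dfs (graph : List (Int × List (Int × Int))) (start : Int) (end_ : Int) (color : Int) (visited : List Int) : Prop :=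
  start = end_ ∨
    ((PySem.Dict.mk graph).contains start = true ∧
     ∀ p ∈ graph, ∀ q ∈ p.2, q.2 = color →
       q.1 = end_ ∨ q.1 ∈ visited ∨ (PySem.Dict.mk graph).contains q.1 = true)
instance (graph : List (Int × List (Int × Int))) (start : Int) (end_ : Int) (color : Int) (visited : List Int) : Decidable (Pre_dfs graph start end_ color visited) := by unfold Pre_dfs; infer_instance

def pvWitness_dfs : (List (Int × List (Int × Int))) × Int × Int × Int × List Int :=
  ([(1, [(2, 0)]), (2, [])], 1, 2, 0, [])

def Spec_dfs (graph : List (Int × List (Int × Int))) (start : Int) (end_ : Int) (color : Int) (visited : List Int) (out : Bool) : Prop := out = dfs_alt graph start end_ color visited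
instance (graph : List (Int × List (Int × Int))) (start : Int) (end_ : Int) (color : Int) (visited : List Int) (out : Bool) : Decidable (Spec_dfs graph start end_ color visited out) := by unfold Spec_dfs; infer_instance

-- ===== CLAIM (what is proved, stated in full; the proofs are below) =====
def Claim_equal_dfs : Prop := ∀ (graph : List (Int × List (Int × Int))) (start : Int) (end_ : Int) (color : Int) (visited : List Int), Dom_dfs graph start end_ color visited → Pre_dfs graph start end_ color visited → Spec_dfs graph start end_ color visited (dfs graph start end_ color visited)

-- ===== LEMMAS AND PROOFS =====

-- the step function of A's fold, named so the lemmas can speak about it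
def pvF (g : List (Int × List (Int × Int))) (e col : Int) (f : Nat) :
    Bool × PySem.Set Int → Int × Int → Bool × PySem.Set Int :=
  fun acc p =>
    if acc.1 then acc
    else if !(PySem.Set.contains acc.2 p.1) && (p.2 == col) then pvDfsA g e col f p.1 acc.2
    else acc

theorem pvDfsA_succ (g : List (Int × List (Int × Int))) (e col : Int) (f : Nat) (s : Int) (V : PySem.Set Int) :
    pvDfsA g e col (f + 1) s V =
      if s = e then (true, V)
      else
        match (PySem.Dict.mk g).get? s with
        | none => (false, PySem.Set.add V s)
        | some adj => adj.foldl (pvF g e col f) (false, PySem.Set.add V s) := by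
  rfl

theorem pv_foldl_true (g : List (Int × List (Int × Int))) (e col : Int) (f : Nat)
    (l : List (Int × Int)) (W : PySem.Set Int) :
    l.foldl (pvF g e col f) (true, W) = (true, W) := by
  induction l with
  | nil => rfl
  | cons hd t IH => simp only [List.foldl_cons, pvF]; exact IH

-- simulation: running B's machine with a top frame (f, adj) equals folding A's loop body
-- (with call fuel f) over adj and continuing the machine with the resulting state
theorem pv_run_loop (g : List (Int × List (Int × Int))) (e col : Int) :
    ∀ (f : Nat) (adj : List (Int × Int)) (rest : List (Nat × List (Int × Int))) (V : PySem.Set Int),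
      pvRunB g e col ((f, adj) :: rest) V =
        (if (adj.foldl (pvF g e col f) (false, V)).1 then true
         else pvRunB g e col rest (adj.foldl (pvF g e col f) (false, V)).2) := by
  intro f
  induction f using Nat.strong_induction_on with
  | _ f IH =>
    intro adj
    induction adj with
    | nil => intro rest V; rw [pvRunB]; simp
    | cons hd t IHt =>
      intro rest V
      obtain ⟨n, c⟩ := hd
      rw [pvRunB.eq_def]
      by_cases hc : (!(PySem.Set.contains V n) && (c == col)) = true
      · simp only [hc, if_true, List.foldl_cons]
        have hstep : pvF g e col f (false, V) (n, c) = pvDfsA g e col f n V := by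
          simp only [pvF]; rw [if_neg (by simp), if_pos hc]
        rw [hstep]
        cases f with
        | zero =>
          -- depth fuel exhausted: A's call returns (false, V); B skips the element
          have h0 : pvDfsA g e col 0 n V = (false, V) := rfl
          rw [h0]
          exact IHt rest V
        | succ f' =>
          by_cases hend : n = e
          · -- B returns True before pushing; A's recursive call returns (true, V)
            have hdfs : pvDfsA g e col (f' + 1) e V = (true, V) := by
              rw [pvDfsA_succ]; simp
            simp [hend, hdfs, pv_foldl_true]
          · simp only [hend, if_false]
            rw [pvDfsA_succ]
            simp only [hend, if_false]
            cases hg : (PySem.Dict.mk g).get? n with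
            | none =>
              -- A's call: visited.add(n) then KeyError path; B pushes the empty frame
              simp only [Option.getD]
              rw [show pvRunB g e col ((f', []) :: (f' + 1, t) :: rest) (PySem.Set.add V n) =
                    pvRunB g e col ((f' + 1, t) :: rest) (PySem.Set.add V n) from by
                rw [pvRunB.eq_def]]
              exact IHt rest (PySem.Set.add V n)
            | some adj2 =>
              simp only [Option.getD]
              rw [IH f' (Nat.lt_succ_self f') adj2 ((f' + 1, t) :: rest) (PySem.Set.add V n)]
              rcases hr : adj2.foldl (pvF g e col f') (false, PySem.Set.add V n) with ⟨b, W⟩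
              cases b with
              | true => simp [pv_foldl_true]
              | false =>
                simp only [Bool.false_eq_true, if_false]
                simpa using IHt rest W
      · simp only [hc, List.foldl_cons]
        have hstep : pvF g e col f (false, V) (n, c) = (false, V) := by
          simp only [pvF]; rw [if_neg (by simp), if_neg hc]
        rw [hstep]
        exact IHt rest V

-- the two ports agree on every input (Pre_ is needed only for faithfulness to the Pythons)
theorem pv_dfs_eq (graph : List (Int × List (Int × Int))) (start end_ color : Int) (visited : List Int) :
    dfs graph start end_ color visited = dfs_alt graph start end_ color visited := by
  unfold dfs dfs_alt
  rw [pvDfsA_succ]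
  by_cases hs : start = end_
  · simp [hs]
  · simp only [hs, if_false]
    cases hg : (PySem.Dict.mk graph).get? start with
    | none => simp
    | some adj =>
      simp only
      rw [pv_run_loop graph end_ color graph.length adj []
          (PySem.Set.add (PySem.Set.ofList visited) start)]
      by_cases hb : (adj.foldl (pvF graph end_ color graph.length)
          (false, PySem.Set.add (PySem.Set.ofList visited) start)).1 = true
      · simp [hb]
      · simp [hb, pvRunB]

-- ===== VERDICT (by name: the statement is the Claim_ definition above) =====
theorem dfs_spec : Claim_equal_dfs := by
  intro graph start end_ color visited _ _
  unfold Spec_dfs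
  exact pv_dfs_eq graph start end_ color visited
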